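-- pv_equiv track=rewrite | github.com/lancelote/advent_of_code | src/year2019/day6b.py | closest_distance
-- ===== SOURCE A (Python) =====
-- from typing import DefaultDict
-- from typing import Set
--
-- MAP = DefaultDict[str, Set]
--
-- def closest_distance(start: str, stop: str, orbit_map: MAP) -> int:
--     """Find closest distance between start and stop."""
--     distance = 0
--     to_visit_now = {start}
--     to_visit_next = set()
--
--     while to_visit_now:
--         for node in to_visit_now:
--             if node == stop:
--                 return distance - 2
--             else:
--                 to_visit_next.update(orbit_map[node])
--
--         distance += 1
--         to_visit_now = to_visit_next - to_visit_now
--         to_visit_next = set()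
--
--     return -1
-- ===== SOURCE B (Python) =====
-- def closest_distance(start: str, stop: str, orbit_map) -> int:
--     """Find closest distance between start and stop.
--
--     Saturation search: grow the set of nodes reachable within `distance`
--     steps until it contains stop, or stops growing (then stop is
--     unreachable).  Return value only; orbit_map is never mutated.
--     """
--     seen = {start}
--     distance = 0
--     while stop not in seen:
--         grown = seen | {nbr for node in seen for nbr in orbit_map.get(node, ())}
--         if grown == seen:
--             return -1
--         seen = grown
--         distance += 1
--     return distance - 2
-- ===== Notes on version B (the rewrite author's own statement) =====
-- stated objective: simpler
-- what changed: B replaces A's two synchronized frontier sets (whose next frontier subtracts only the current level, so A revisits nodes and loops forever on unreachable stops, and raises KeyError on keys missing from the dict) by a monotone saturation of one 'seen' set that stops at a fixpoint, using dict.get so it is total and never raises.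
-- outside the precondition, e.g. on closest_distance('a', 'b', {'a': {'c'}}): A raises KeyError, B returns -1
import Mathlib
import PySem

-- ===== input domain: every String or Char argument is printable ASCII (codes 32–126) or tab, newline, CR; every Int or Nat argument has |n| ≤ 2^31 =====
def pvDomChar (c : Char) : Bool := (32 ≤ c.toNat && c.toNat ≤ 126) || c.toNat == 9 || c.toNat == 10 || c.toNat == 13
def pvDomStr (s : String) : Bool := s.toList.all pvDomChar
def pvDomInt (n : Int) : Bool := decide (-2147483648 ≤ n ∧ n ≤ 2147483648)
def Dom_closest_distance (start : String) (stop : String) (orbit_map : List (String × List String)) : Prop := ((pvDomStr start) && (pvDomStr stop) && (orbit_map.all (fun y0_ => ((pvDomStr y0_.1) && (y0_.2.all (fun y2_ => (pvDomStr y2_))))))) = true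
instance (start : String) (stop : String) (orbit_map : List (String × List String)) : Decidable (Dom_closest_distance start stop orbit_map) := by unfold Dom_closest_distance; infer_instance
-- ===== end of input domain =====

-- B replaces A's oscillating two-frontier search by a monotone reachable-set saturation that always
-- terminates and never raises; the claim is about the RETURN value (neither program mutates the dict).

-- shared lookup helper: python dict built from the pairs (later pairs overwrite earlier ones);
-- none = KeyError on orbit_map[x] for a missing key x
def pvNbrs? (m : List (String × List String)) (x : String) : Option (List String) :=
  (PySem.Dict.ofList m).get? x

-- total lookup used by B's port: orbit_map.get(x, ())
def pvNbrs (m : List (String × List String)) (x : String) : List String :=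
  (pvNbrs? m x).getD []

-- universe of node names appearing in the input, and the level bound used as fuel
def pvUniv (start : String) (stop : String) (m : List (String × List String)) : PySem.Set String :=
  PySem.Set.ofList (start :: stop :: (m.map Prod.fst ++ m.flatMap Prod.snd))

def pvK (start : String) (stop : String) (m : List (String × List String)) : Nat :=
  (pvUniv start stop m).length + 1

-- ===== PORT A =====
-- one level: to_visit_next.update(orbit_map[node]) for every node of the frontier;
-- none = KeyError (orbit_map[node] on a missing key)
def pvNextA (m : List (String × List String)) (now : PySem.Set String) : Option (PySem.Set String) :=
  now.foldl (fun acc node => acc.bind (fun s => (pvNbrs? m node).map (fun ns => PySem.Set.update s ns)))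
    (some PySem.Set.empty)

-- the while-loop; the per-node 'if node == stop: return' is rendered as a frontier membership test,
-- the same return value since the loop returns exactly when stop is in the frontier (set iteration
-- order is not modelled; Pre_ excludes the runs where that order decides return-vs-KeyError).
-- Fuel-bounded; Pre_ proves the fuel is never exhausted.
def pvLoopA (stop : String) (m : List (String × List String)) :
    Nat → PySem.Set String → Int → Option Int
  | 0, _, _ => none
  | fuel+1, now, dist =>
    if now = [] then some (-1)
    else if PySem.Set.contains now stop then some (dist - 2)
    else match pvNextA m now with
      | none => none
      | some next => pvLoopA stop m fuel (PySem.Set.diff next now) (dist + 1)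

def closest_distance (start : String) (stop : String) (orbit_map : List (String × List String)) : Int :=
  (pvLoopA stop orbit_map (pvK start stop orbit_map + 1) (PySem.Set.ofList [start]) 0).getD 0

-- ===== PORT B =====
-- saturation: grow seen until stop appears or a fixpoint is reached (Source B); .get(node, ()) never raises
def pvLoopB (stop : String) (m : List (String × List String)) :
    Nat → PySem.Set String → Int → Int
  | 0, _, _ => 0
  | fuel+1, seen, dist =>
    if PySem.Set.contains seen stop then dist - 2
    else
      let grown := PySem.Set.update seen (seen.flatMap (fun node => pvNbrs m node))
      if PySem.Set.equal grown seen then -1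
      else pvLoopB stop m fuel grown (dist + 1)

def closest_distance_alt (start : String) (stop : String) (orbit_map : List (String × List String)) : Int :=
  pvLoopB stop orbit_map (pvK start stop orbit_map + 1) (PySem.Set.ofList [start]) 0

-- ===== PRECONDITION & SPEC =====
-- mathematical neighbour / frontier / saturation sequences (Finset-valued, used only by Pre_ and the proofs)
def pvNbrsF (m : List (String × List String)) (x : String) : Finset String :=
  (pvNbrs m x).toFinset

def pvF (start : String) (m : List (String × List String)) : Nat → Finset String
  | 0 => {start}
  | d+1 => (pvF start m d).biUnion (pvNbrsF m) \ pvF start m d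

-- Pre_ admits the runs of A that deterministically return: start == stop (immediate return), or the
-- frontier sequence F finds stop or empties at some level d (within pvK levels, the bound the frontier
-- dynamics observe) while every non-stop node of the frontiers up to level d is a key of the dict —
-- those are exactly the nodes A indexes before returning.  Excluded: runs where A raises KeyError,
-- runs where A loops forever (oscillating frontier with unreachable stop), and the iteration-order
-- corner where the final frontier holds both stop and a missing key, so A's return-vs-KeyError depends
-- on set iteration order (when A does return there it returns d-2, which B returns too).
def Pre_closest_distance (start : String) (stop : String) (orbit_map : List (String × List String)) : Prop :=
  start = stop ∨
    ∃ d ≤ pvK start stop orbit_map,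
      (stop ∈ pvF start orbit_map d ∨ pvF start orbit_map d = ∅) ∧
      ∀ e ≤ d, ∀ x ∈ pvF start orbit_map e, x ≠ stop → (pvNbrs? orbit_map x).isSome = true

instance (start : String) (stop : String) (orbit_map : List (String × List String)) : Decidable (Pre_closest_distance start stop orbit_map) := by
  unfold Pre_closest_distance; infer_instance

def pvWitness_closest_distance : String × String × (List (String × List String)) :=
  ("a", "b", [("a", ["b"])])

def Spec_closest_distance (start : String) (stop : String) (orbit_map : List (String × List String)) (out : Int) : Prop := out = closest_distance_alt start stop orbit_map
instance (start : String) (stop : String) (orbit_map : List (String × List String)) (out : Int) : Decidable (Spec_closest_distance start stop orbit_map out) := by unfold Spec_closest_distance; infer_instance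

-- ===== CLAIM (what is proved, stated in full; the proofs are below) =====
def Claim_equal_closest_distance : Prop := ∀ (start : String) (stop : String) (orbit_map : List (String × List String)), Dom_closest_distance start stop orbit_map → Pre_closest_distance start stop orbit_map → Spec_closest_distance start stop orbit_map (closest_distance start stop orbit_map)

-- ===== LEMMAS AND PROOFS =====

-- saturation sequence of B (nodes reachable within k steps), used only by the proofs
def pvSeen (start : String) (m : List (String × List String)) : Nat → Finset String
  | 0 => {start}
  | k+1 => pvSeen start m k ∪ (pvSeen start m k).biUnion (pvNbrsF m)

-- Repr s t: the port's set-state s has exactly the members of the mathematical Finset t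
def pvRepr (s : PySem.Set String) (t : Finset String) : Prop := ∀ x, x ∈ s ↔ x ∈ t

theorem mem_pvSeen_succ (start : String) (m : List (String × List String)) (k : Nat) (x : String) :
    x ∈ pvSeen start m (k+1) ↔ x ∈ pvSeen start m k ∨ ∃ y ∈ pvSeen start m k, x ∈ pvNbrsF m y := by
  show x ∈ pvSeen start m k ∪ (pvSeen start m k).biUnion (pvNbrsF m) ↔ _
  simp [Finset.mem_union, Finset.mem_biUnion]

theorem mem_pvF_succ (start : String) (m : List (String × List String)) (d : Nat) (x : String) :
    x ∈ pvF start m (d+1) ↔ (∃ y ∈ pvF start m d, x ∈ pvNbrsF m y) ∧ x ∉ pvF start m d := by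
  show x ∈ (pvF start m d).biUnion (pvNbrsF m) \ pvF start m d ↔ _
  simp [Finset.mem_sdiff, Finset.mem_biUnion]

-- pvNextA succeeds when every frontier node is a key, and collects exactly the neighbours
theorem pvNextA_aux (m : List (String × List String)) :
    ∀ (l : List String) (s : PySem.Set String),
      (∀ node ∈ l, (pvNbrs? m node).isSome = true) →
      ∃ next,
        l.foldl (fun acc node => acc.bind (fun s => (pvNbrs? m node).map (fun ns => PySem.Set.update s ns))) (some s) = some next ∧
        ∀ x, x ∈ next ↔ x ∈ s ∨ ∃ y ∈ l, x ∈ pvNbrs m y := by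
  intro l
  induction l with
  | nil => intro s _; exact ⟨s, rfl, by simp⟩
  | cons y l ih =>
    intro s h
    obtain ⟨ns, hns⟩ := Option.isSome_iff_exists.mp (h y (by simp))
    obtain ⟨next, hfold, hmem⟩ := ih (PySem.Set.update s ns) (fun node hn => h node (by simp [hn]))
    refine ⟨next, ?_, ?_⟩
    · simpa [hns] using hfold
    · intro x
      rw [hmem x, PySem.Set.mem_update]
      constructor
      · rintro ((hx | hx) | ⟨z, hz, hxz⟩)
        · exact Or.inl hx
        · exact Or.inr ⟨y, by simp, by simp [pvNbrs, hns, hx]⟩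
        · exact Or.inr ⟨z, by simp [hz], hxz⟩
      · rintro (hx | ⟨z, hz, hxz⟩)
        · exact Or.inl (Or.inl hx)
        · rcases List.mem_cons.mp hz with rfl | hz
          · exact Or.inl (Or.inr (by simpa [pvNbrs, hns] using hxz))
          · exact Or.inr ⟨z, hz, hxz⟩

theorem pvNextA_some (m : List (String × List String)) (now : PySem.Set String)
    (h : ∀ node ∈ now, (pvNbrs? m node).isSome = true) :
    ∃ next, pvNextA m now = some next ∧ ∀ x, x ∈ next ↔ ∃ y ∈ now, x ∈ pvNbrs m y := by
  obtain ⟨next, hfold, hmem⟩ := pvNextA_aux m now PySem.Set.empty h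
  refine ⟨next, hfold, fun x => ?_⟩
  rw [hmem x]
  simp [PySem.Set.empty]

theorem pvF_subset_seen (start : String) (m : List (String × List String)) :
    ∀ d, pvF start m d ⊆ pvSeen start m d := by
  intro d
  induction d with
  | zero => simp [pvF, pvSeen]
  | succ d ih =>
    intro x hx
    simp only [pvF, Finset.mem_sdiff, Finset.mem_biUnion] at hx
    obtain ⟨⟨y, hy, hxy⟩, _⟩ := hx
    simp only [pvSeen, Finset.mem_union, Finset.mem_biUnion]
    exact Or.inr ⟨y, ih hy, hxy⟩

theorem pvSeen_subset_succ (start : String) (m : List (String × List String)) (k : Nat) :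
    pvSeen start m k ⊆ pvSeen start m (k+1) := by
  simp only [pvSeen]
  exact Finset.subset_union_left

theorem pvLevel_subset_F (start : String) (m : List (String × List String)) :
    ∀ d, pvSeen start m (d+1) \ pvSeen start m d ⊆ pvF start m (d+1) := by
  intro d
  induction d with
  | zero =>
    intro x hx
    simp only [pvSeen, Finset.mem_sdiff, Finset.mem_union, Finset.mem_biUnion] at hx
    obtain ⟨hx1, hx0⟩ := hx
    rcases hx1 with hx1 | ⟨y, hy, hxy⟩
    · exact absurd hx1 hx0
    · simp only [pvF, Finset.mem_sdiff, Finset.mem_biUnion]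
      exact ⟨⟨y, by simpa [pvF] using hy, hxy⟩, by simpa [pvF] using hx0⟩
  | succ e ih =>
    intro x hx
    obtain ⟨hx1, hx0⟩ := Finset.mem_sdiff.mp hx
    rcases (mem_pvSeen_succ start m (e+1) x).mp hx1 with hx1 | ⟨y, hy, hxy⟩
    · exact absurd hx1 hx0
    · by_cases hye : y ∈ pvSeen start m e
      · exact absurd ((mem_pvSeen_succ start m e x).mpr (Or.inr ⟨y, hye, hxy⟩)) hx0
      · have hyF : y ∈ pvF start m (e+1) := ih (Finset.mem_sdiff.mpr ⟨hy, hye⟩)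
        have hxF : x ∉ pvF start m (e+1) :=
          fun hc => hx0 (pvF_subset_seen start m (e+1) hc)
        exact (mem_pvF_succ start m (e+1) x).mpr ⟨⟨y, hyF, hxy⟩, hxF⟩

theorem pvSeen_fix_stable (start : String) (m : List (String × List String)) {k : Nat}
    (h : pvSeen start m (k+1) = pvSeen start m k) :
    ∀ l, k ≤ l → pvSeen start m l = pvSeen start m k := by
  intro l hl
  induction l with
  | zero => simp [Nat.le_zero.mp hl]
  | succ l ih =>
    rcases Nat.lt_or_ge k (l+1) with hk | hk
    · have hkl : k ≤ l := Nat.lt_succ_iff.mp hk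
      have hsl := ih hkl
      calc pvSeen start m (l+1)
          = pvSeen start m l ∪ (pvSeen start m l).biUnion (pvNbrsF m) := rfl
        _ = pvSeen start m k ∪ (pvSeen start m k).biUnion (pvNbrsF m) := by rw [hsl]
        _ = pvSeen start m (k+1) := rfl
        _ = pvSeen start m k := h
    · simp [Nat.le_antisymm hl hk]

theorem pvF_empty_fix (start : String) (m : List (String × List String)) {d : Nat}
    (h : pvF start m (d+1) = ∅) :
    pvSeen start m (d+1) = pvSeen start m d := by
  apply Finset.Subset.antisymm
  · have hsub := pvLevel_subset_F start m d
    rw [h] at hsub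
    intro x hx
    by_contra hxd
    exact absurd (hsub (Finset.mem_sdiff.mpr ⟨hx, hxd⟩)) (Finset.notMem_empty x)
  · exact pvSeen_subset_succ start m d

theorem pvF0_mem (start : String) (m : List (String × List String)) :
    start ∈ pvF start m 0 := by
  simp [pvF]

-- main loop characterisation for A's port
theorem pvLoopA_eq (start stop : String) (m : List (String × List String)) :
    ∀ (n : Nat) (fuel : Nat) (d : Nat) (now : PySem.Set String),
      pvRepr now (pvF start m d) →
      (∀ e, e < d + n → ¬(stop ∈ pvF start m e ∨ pvF start m e = ∅)) →
      (stop ∈ pvF start m (d + n) ∨ pvF start m (d + n) = ∅) →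
      (∀ e x, e < d + n → x ∈ pvF start m e → (pvNbrs? m x).isSome = true) →
      n < fuel →
      pvLoopA stop m fuel now (d : Int) =
        some (if stop ∈ pvF start m (d + n) then ((d + n : Nat) : Int) - 2 else -1) := by
  intro n
  induction n with
  | zero =>
    intro fuel d now hrepr _hK hE hkeys hfuel
    obtain ⟨f, rfl⟩ : ∃ f, fuel = f + 1 := ⟨fuel - 1, by omega⟩
    simp only [Nat.add_zero] at hE ⊢
    by_cases hnow : now = []
    · have hFd : pvF start m d = ∅ :=
        Finset.eq_empty_iff_forall_notMem.mpr fun x hx => by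
          have := (hrepr x).mpr hx; rw [hnow] at this; simp at this
      have hstop : stop ∉ pvF start m d := by simp [hFd]
      simp [pvLoopA, hnow, hstop]
    · have hFd : stop ∈ pvF start m d := by
        rcases hE with h | h
        · exact h
        · exfalso
          apply hnow
          cases now with
          | nil => rfl
          | cons a t =>
            have := (hrepr a).mp (by simp)
            rw [h] at this
            simp at this
      have hmemstop : stop ∈ now := (hrepr stop).mpr hFd
      simp [pvLoopA, hnow, hFd, hmemstop]
  | succ n ih =>
    intro fuel d now hrepr hK hE hkeys hfuel
    obtain ⟨f, rfl⟩ : ∃ f, fuel = f + 1 := ⟨fuel - 1, by omega⟩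
    have hne := hK d (by omega)
    have hstopd : stop ∉ pvF start m d := fun hc => hne (Or.inl hc)
    have hFdne : pvF start m d ≠ ∅ := fun hc => hne (Or.inr hc)
    have hnow : now ≠ [] := by
      intro hc
      apply hFdne
      exact Finset.eq_empty_iff_forall_notMem.mpr fun x hx => by
        have := (hrepr x).mpr hx; rw [hc] at this; simp at this
    have hcont : PySem.Set.contains now stop = false := by
      rw [Bool.eq_false_iff]
      intro hc
      exact hstopd ((hrepr stop).mp ((PySem.Set.contains_iff _ _).mp hc))
    obtain ⟨next, hnext, hmem⟩ :=
      pvNextA_some m now (fun node hn => hkeys d node (by omega) ((hrepr node).mp hn))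
    have hrepr' : pvRepr (PySem.Set.diff next now) (pvF start m (d+1)) := by
      intro x
      rw [PySem.Set.mem_diff, hmem x, mem_pvF_succ]
      constructor
      · rintro ⟨⟨y, hy, hxy⟩, hxn⟩
        exact ⟨⟨y, (hrepr y).mp hy, by simpa [pvNbrsF] using hxy⟩,
               fun hc => hxn ((hrepr x).mpr hc)⟩
      · rintro ⟨⟨y, hy, hxy⟩, hxn⟩
        exact ⟨⟨y, (hrepr y).mpr hy, by simpa [pvNbrsF] using hxy⟩,
               fun hc => hxn ((hrepr x).mp hc)⟩
    have hrec := ih f (d+1) (PySem.Set.diff next now) hrepr'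
      (fun e he => hK e (by omega))
      (by have hidx : d + 1 + n = d + (n+1) := by omega
          rw [hidx]; exact hE)
      (fun e x he hx => hkeys e x (by omega) hx)
      (by omega)
    have hidx : d + 1 + n = d + (n+1) := by omega
    rw [hidx] at hrec
    have hcast : ((d : Int) + 1) = ((d + 1 : Nat) : Int) := by push_cast; ring
    simp only [pvLoopA, if_neg hnow, hcont, Bool.false_eq_true, if_false, hnext]
    rw [hcast]
    exact hrec

-- main loop characterisation for B's port
theorem pvLoopB_eq (start stop : String) (m : List (String × List String)) :
    ∀ (n : Nat) (fuel : Nat) (k : Nat) (seenS : PySem.Set String),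
      pvRepr seenS (pvSeen start m k) →
      (∀ e, e < k + n → ¬(stop ∈ pvSeen start m e ∨ pvSeen start m (e+1) = pvSeen start m e)) →
      (stop ∈ pvSeen start m (k + n) ∨ pvSeen start m (k + n + 1) = pvSeen start m (k + n)) →
      n < fuel →
      pvLoopB stop m fuel seenS (k : Int) =
        if stop ∈ pvSeen start m (k + n) then ((k + n : Nat) : Int) - 2 else -1 := by
  intro n
  induction n with
  | zero =>
    intro fuel k seenS hrepr _hK hE hfuel
    obtain ⟨f, rfl⟩ : ∃ f, fuel = f + 1 := ⟨fuel - 1, by omega⟩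
    simp only [Nat.add_zero] at hE ⊢
    by_cases hstop : stop ∈ pvSeen start m k
    · have hmemstop : stop ∈ seenS := (hrepr stop).mpr hstop
      simp [pvLoopB, hstop, hmemstop]
    · have hfix : pvSeen start m (k+1) = pvSeen start m k := by
        rcases hE with h | h
        · exact absurd h hstop
        · exact h
      have hcont : PySem.Set.contains seenS stop = false := by
        rw [Bool.eq_false_iff]
        intro hc
        exact hstop ((hrepr stop).mp ((PySem.Set.contains_iff _ _).mp hc))
      have hgrow : ∀ x, x ∈ PySem.Set.update seenS (seenS.flatMap (fun node => pvNbrs m node)) ↔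
          x ∈ pvSeen start m (k+1) := by
        intro x
        rw [PySem.Set.mem_update, List.mem_flatMap, mem_pvSeen_succ]
        constructor
        · rintro (hx | ⟨y, hy, hxy⟩)
          · exact Or.inl ((hrepr x).mp hx)
          · exact Or.inr ⟨y, (hrepr y).mp hy, by simpa [pvNbrsF] using hxy⟩
        · rintro (hx | ⟨y, hy, hxy⟩)
          · exact Or.inl ((hrepr x).mpr hx)
          · exact Or.inr ⟨y, (hrepr y).mpr hy, by simpa [pvNbrsF] using hxy⟩
      have hequal : PySem.Set.equal (PySem.Set.update seenS (seenS.flatMap (fun node => pvNbrs m node))) seenS = true := by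
        rw [PySem.Set.equal_iff]
        intro x
        rw [hgrow x, hfix]
        exact ((hrepr x).symm)
      have hnm : stop ∉ seenS := fun hc => hstop ((hrepr stop).mp hc)
      simp [pvLoopB, hequal, hstop, hnm]
  | succ n ih =>
    intro fuel k seenS hrepr hK hE hfuel
    obtain ⟨f, rfl⟩ : ∃ f, fuel = f + 1 := ⟨fuel - 1, by omega⟩
    have hne := hK k (by omega)
    have hstopk : stop ∉ pvSeen start m k := fun hc => hne (Or.inl hc)
    have hfixne : pvSeen start m (k+1) ≠ pvSeen start m k := fun hc => hne (Or.inr hc)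
    have hcont : PySem.Set.contains seenS stop = false := by
      rw [Bool.eq_false_iff]
      intro hc
      exact hstopk ((hrepr stop).mp ((PySem.Set.contains_iff _ _).mp hc))
    have hgrow : ∀ x, x ∈ PySem.Set.update seenS (seenS.flatMap (fun node => pvNbrs m node)) ↔
        x ∈ pvSeen start m (k+1) := by
      intro x
      rw [PySem.Set.mem_update, List.mem_flatMap, mem_pvSeen_succ]
      constructor
      · rintro (hx | ⟨y, hy, hxy⟩)
        · exact Or.inl ((hrepr x).mp hx)
        · exact Or.inr ⟨y, (hrepr y).mp hy, by simpa [pvNbrsF] using hxy⟩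
      · rintro (hx | ⟨y, hy, hxy⟩)
        · exact Or.inl ((hrepr x).mpr hx)
        · exact Or.inr ⟨y, (hrepr y).mpr hy, by simpa [pvNbrsF] using hxy⟩
    have hequal : PySem.Set.equal (PySem.Set.update seenS (seenS.flatMap (fun node => pvNbrs m node))) seenS = false := by
      rw [Bool.eq_false_iff]
      intro hc
      apply hfixne
      apply Finset.ext
      intro x
      rw [← hgrow x, ← hrepr x]
      exact (PySem.Set.equal_iff _ _).mp hc x
    have hrec := ih f (k+1) (PySem.Set.update seenS (seenS.flatMap (fun node => pvNbrs m node)))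
      (fun x => hgrow x)
      (fun e he => hK e (by omega))
      (by have hidx : k + 1 + n = k + (n+1) := by omega
          rw [hidx]; exact hE)
      (by omega)
    have hidx : k + 1 + n = k + (n+1) := by omega
    rw [hidx] at hrec
    have hcast : ((k : Int) + 1) = ((k + 1 : Nat) : Int) := by push_cast; ring
    simp only [pvLoopB, hcont, Bool.false_eq_true, if_false, hequal]
    rw [hcast]
    exact hrec

theorem pvF0_ne_empty (start : String) (m : List (String × List String)) :
    pvF start m 0 ≠ ∅ := by
  intro hc
  have := pvF0_mem start m
  rw [hc] at this
  simp at this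

-- ===== VERDICT (by name: the statement is the Claim_ definition above) =====
theorem closest_distance_spec : Claim_equal_closest_distance := by
  intro start stop m _hdom hpre
  unfold Spec_closest_distance
  rcases hpre with hss | ⟨d, hdK, hEw, hkeysd⟩
  · -- start = stop: both return -2 immediately
    subst hss
    have hmem : start ∈ PySem.Set.ofList [start] := by rw [PySem.Set.mem_ofList]; simp
    have hnil : PySem.Set.ofList [start] ≠ [] := by
      intro hc; rw [hc] at hmem; simp at hmem
    unfold closest_distance closest_distance_alt
    simp [pvLoopA, pvLoopB, hnil, hmem]
  · have hrepr0 : pvRepr (PySem.Set.ofList [start]) (pvF start m 0) := by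
      intro x
      rw [PySem.Set.mem_ofList]
      show x ∈ [start] ↔ x ∈ ({start} : Finset String)
      simp
    have hreprS0 : pvRepr (PySem.Set.ofList [start]) (pvSeen start m 0) := by
      intro x
      rw [PySem.Set.mem_ofList]
      show x ∈ [start] ↔ x ∈ ({start} : Finset String)
      simp
    have hexA : ∃ e, stop ∈ pvF start m e ∨ pvF start m e = ∅ := ⟨d, hEw⟩
    have hDE := Nat.find_spec hexA
    have hDmin : ∀ e, e < Nat.find hexA → ¬(stop ∈ pvF start m e ∨ pvF start m e = ∅) :=
      fun e he => Nat.find_min hexA he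
    have hDd : Nat.find hexA ≤ d := Nat.find_min' hexA hEw
    have hDK : Nat.find hexA ≤ pvK start stop m := le_trans hDd hdK
    have hkeys' : ∀ e x, e < Nat.find hexA → x ∈ pvF start m e → (pvNbrs? m x).isSome = true := by
      intro e x he hx
      refine hkeysd e (le_trans (le_of_lt he) hDd) x hx ?_
      intro hxs
      subst hxs
      exact (hDmin e he) (Or.inl hx)
    have hA : closest_distance start stop m =
        (if stop ∈ pvF start m (Nat.find hexA) then ((Nat.find hexA : Nat) : Int) - 2 else -1) := by
      unfold closest_distance
      have h := pvLoopA_eq start stop m (Nat.find hexA) (pvK start stop m + 1) 0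
        (PySem.Set.ofList [start]) hrepr0
        (by simpa using hDmin) (by simpa using hDE) (by simpa using hkeys') (by omega)
      simp only [Nat.cast_zero, Nat.zero_add] at h
      rw [h]
      simp
    have hexB : ∃ k, stop ∈ pvSeen start m k ∨ pvSeen start m (k+1) = pvSeen start m k := by
      rcases hDE with h | h
      · exact ⟨Nat.find hexA, Or.inl (pvF_subset_seen start m (Nat.find hexA) h)⟩
      · cases hD0 : Nat.find hexA with
        | zero => rw [hD0] at h; exact absurd h (pvF0_ne_empty start m)
        | succ e => rw [hD0] at h; exact ⟨e, Or.inr (pvF_empty_fix start m h)⟩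
    have hD'E := Nat.find_spec hexB
    have hD'min : ∀ e, e < Nat.find hexB →
        ¬(stop ∈ pvSeen start m e ∨ pvSeen start m (e+1) = pvSeen start m e) :=
      fun e he => Nat.find_min hexB he
    have hD'D : Nat.find hexB ≤ Nat.find hexA := by
      rcases hDE with h | h
      · exact Nat.find_min' hexB (Or.inl (pvF_subset_seen start m (Nat.find hexA) h))
      · cases hD0 : Nat.find hexA with
        | zero => rw [hD0] at h; exact absurd h (pvF0_ne_empty start m)
        | succ e =>
          rw [hD0] at h
          exact le_trans (Nat.find_min' hexB (Or.inr (pvF_empty_fix start m h))) (by omega)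
    have hD'K : Nat.find hexB ≤ pvK start stop m := le_trans hD'D hDK
    have hB : closest_distance_alt start stop m =
        (if stop ∈ pvSeen start m (Nat.find hexB) then ((Nat.find hexB : Nat) : Int) - 2 else -1) := by
      unfold closest_distance_alt
      have h := pvLoopB_eq start stop m (Nat.find hexB) (pvK start stop m + 1) 0
        (PySem.Set.ofList [start]) hreprS0
        (by simpa using hD'min) (by simpa using hD'E) (by omega)
      simp only [Nat.cast_zero, Nat.zero_add] at h
      rw [h]
    rw [hA, hB]
    by_cases hs : stop ∈ pvSeen start m (Nat.find hexB)
    · rw [if_pos hs]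
      have hstopF : stop ∈ pvF start m (Nat.find hexB) := by
        cases hD'0 : Nat.find hexB with
        | zero =>
          rw [hD'0] at hs
          have hse : stop = start := by
            have : stop ∈ ({start} : Finset String) := hs
            simpa using this
          rw [hse]
          exact pvF0_mem start m
        | succ e =>
          rw [hD'0] at hs
          have hnot : stop ∉ pvSeen start m e := fun hc =>
            (hD'min e (by omega)) (Or.inl hc)
          exact pvLevel_subset_F start m e (Finset.mem_sdiff.mpr ⟨hs, hnot⟩)
      have hEq : Nat.find hexA = Nat.find hexB :=
        le_antisymm (Nat.find_min' hexA (Or.inl hstopF)) hD'D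
      rw [hEq, if_pos hstopF]
    · rw [if_neg hs]
      have hfix : pvSeen start m (Nat.find hexB + 1) = pvSeen start m (Nat.find hexB) :=
        hD'E.resolve_left hs
      have hstopnever : ∀ l, stop ∉ pvSeen start m l := by
        intro l
        rcases Nat.lt_or_ge l (Nat.find hexB) with hl | hl
        · exact fun hc => (hD'min l hl) (Or.inl hc)
        · rw [pvSeen_fix_stable start m hfix l hl]
          exact hs
      have hnotF : stop ∉ pvF start m (Nat.find hexA) := fun hc =>
        hstopnever (Nat.find hexA) (pvF_subset_seen start m (Nat.find hexA) hc)
      rw [if_neg hnotF]
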